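-- pv_equiv track=rewrite | github.com/MSaifAsif/py-cqengine | benchmarks/competitive/harness.py | _auto_iterations
-- ===== SOURCE A (Python) =====
-- def _auto_iterations(n: int, quick: bool) -> int:
--     """Scale iterations inversely with dataset size to keep total time manageable."""
--     if quick:
--         base = {10_000: 50, 100_000: 20, 1_000_000: 5, 10_000_000: 3}
--     else:
--         base = {10_000: 200, 100_000: 100, 1_000_000: 20, 10_000_000: 5}
--     # Pick the closest size
--     for threshold in sorted(base.keys()):
--         if n <= threshold:
--             return base[threshold]
--     return base[max(base.keys())]
-- ===== SOURCE B (Python) =====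
-- def _auto_iterations(n: int, quick: bool) -> int:
--     """Scale iterations inversely with dataset size to keep total time manageable."""
--     thresholds = [10_000, 100_000, 1_000_000, 10_000_000]
--     values = [50, 20, 5, 3] if quick else [200, 100, 20, 5]
--     # binary search: index of first threshold >= n (bisect_left), clamped to last bucket
--     lo, hi = 0, len(thresholds)
--     while lo < hi:
--         mid = (lo + hi) // 2
--         if thresholds[mid] < n:
--             lo = mid + 1
--         else:
--             hi = mid
--     return values[min(lo, len(thresholds) - 1)]
-- ===== Notes on version B (the rewrite author's own statement) =====
-- stated objective: alternative
-- what changed: Replaces the dict plus sorted-keys linear scan-until-match by two parallel literal tables and a hand-written binary search (bisect_left) for the first threshold >= n, with the resulting index clamped to the last bucket to preserve the fallback.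
import Mathlib
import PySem

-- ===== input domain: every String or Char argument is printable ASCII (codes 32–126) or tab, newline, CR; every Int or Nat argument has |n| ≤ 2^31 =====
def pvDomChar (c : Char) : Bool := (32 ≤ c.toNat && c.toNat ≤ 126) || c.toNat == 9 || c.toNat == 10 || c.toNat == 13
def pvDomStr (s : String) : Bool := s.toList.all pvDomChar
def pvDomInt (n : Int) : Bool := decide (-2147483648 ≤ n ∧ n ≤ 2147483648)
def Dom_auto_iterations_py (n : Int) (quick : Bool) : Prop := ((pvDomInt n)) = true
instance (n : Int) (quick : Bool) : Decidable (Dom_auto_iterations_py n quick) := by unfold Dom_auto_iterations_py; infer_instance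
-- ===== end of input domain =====

-- B replaces A's sorted-keys linear scan with two parallel tables and a hand-written
-- binary search (bisect_left with the index clamped to the last bucket); alternative, not faster.

-- ===== PORT A =====
-- the 'for threshold in sorted(base.keys()): if n <= threshold: return base[threshold]' loop
def autoIterScan (n : Int) (base : PySem.Dict Int Int) : List Int → Option Int
  | [] => none
  | t :: rest => if n ≤ t then some (PySem.Dict.getD base t 0) else autoIterScan n base rest

def auto_iterations_py (n : Int) (quick : Bool) : Int :=
  let base : PySem.Dict Int Int :=
    if quick then PySem.Dict.ofList [(10000, 50), (100000, 20), (1000000, 5), (10000000, 3)]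
    else PySem.Dict.ofList [(10000, 200), (100000, 100), (1000000, 20), (10000000, 5)]
  match autoIterScan n base (PySem.List.sorted (PySem.Dict.keys base) (fun k => k) false) with
  | some v => v
  | none =>
    -- return base[max(base.keys())]
    match PySem.List.max? (PySem.Dict.keys base) (fun k => k) with
    | some m => PySem.Dict.getD base m 0
    | none => 0

-- ===== PORT B =====
-- the hand-written 'while lo < hi' bisect_left loop from Source B
def bisectLoop (thresholds : List Int) (n : Int) (lo hi : Nat) : Nat :=
  if _h : lo < hi then
    let mid := (lo + hi) / 2
    if (PySem.List.pyGet? thresholds (mid : Int)).getD 0 < n then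
      bisectLoop thresholds n (mid + 1) hi
    else
      bisectLoop thresholds n lo mid
  else lo
termination_by hi - lo
decreasing_by all_goals omega

def auto_iterations_py_alt (n : Int) (quick : Bool) : Int :=
  let thresholds : List Int := [10000, 100000, 1000000, 10000000]
  let values : List Int := if quick then [50, 20, 5, 3] else [200, 100, 20, 5]
  let lo := bisectLoop thresholds n 0 thresholds.length
  (PySem.List.pyGet? values ((min lo (thresholds.length - 1) : Nat) : Int)).getD 0

-- ===== PRECONDITION & SPEC =====
def Spec_auto_iterations_py (n : Int) (quick : Bool) (out : Int) : Prop := out = auto_iterations_py_alt n quick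
instance (n : Int) (quick : Bool) (out : Int) : Decidable (Spec_auto_iterations_py n quick out) := by unfold Spec_auto_iterations_py; infer_instance

-- ===== CLAIM (what is proved, stated in full; the proofs are below) =====
def Claim_equal_auto_iterations_py : Prop := ∀ (n : Int) (quick : Bool), Dom_auto_iterations_py n quick → Spec_auto_iterations_py n quick (auto_iterations_py n quick)


-- ===== LEMMAS AND PROOFS =====
theorem bisect_le1 (n : Int) (h : n ≤ 10000) :
    bisectLoop [10000, 100000, 1000000, 10000000] n 0 4 = 0 := by
  rw [bisectLoop]
  simp [PySem.List.pyGet?, PySem.List.pyIdx?, show ¬(1000000:Int) < n from by omega]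
  rw [bisectLoop]
  simp [PySem.List.pyGet?, PySem.List.pyIdx?, show ¬(100000:Int) < n from by omega]
  rw [bisectLoop]
  simp [PySem.List.pyGet?, PySem.List.pyIdx?, show ¬(10000:Int) < n from by omega]
  rw [bisectLoop]
  simp

theorem bisect_le2 (n : Int) (h : 10000 < n ∧ n ≤ 100000) :
    bisectLoop [10000, 100000, 1000000, 10000000] n 0 4 = 1 := by
  rw [bisectLoop]
  simp [PySem.List.pyGet?, PySem.List.pyIdx?, show ¬(1000000:Int) < n from by omega]
  rw [bisectLoop]
  simp [PySem.List.pyGet?, PySem.List.pyIdx?, show ¬(100000:Int) < n from by omega]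
  rw [bisectLoop]
  simp [PySem.List.pyGet?, PySem.List.pyIdx?, show (10000:Int) < n from by omega]
  rw [bisectLoop]
  simp

theorem bisect_le3 (n : Int) (h : 100000 < n ∧ n ≤ 1000000) :
    bisectLoop [10000, 100000, 1000000, 10000000] n 0 4 = 2 := by
  rw [bisectLoop]
  simp [PySem.List.pyGet?, PySem.List.pyIdx?, show ¬(1000000:Int) < n from by omega]
  rw [bisectLoop]
  simp [PySem.List.pyGet?, PySem.List.pyIdx?, show (100000:Int) < n from by omega]
  rw [bisectLoop]
  simp

theorem bisect_le4 (n : Int) (h : 1000000 < n ∧ n ≤ 10000000) :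
    bisectLoop [10000, 100000, 1000000, 10000000] n 0 4 = 3 := by
  rw [bisectLoop]
  simp [PySem.List.pyGet?, PySem.List.pyIdx?, show (1000000:Int) < n from by omega]
  rw [bisectLoop]
  simp [PySem.List.pyGet?, PySem.List.pyIdx?, show ¬(10000000:Int) < n from by omega]
  rw [bisectLoop]
  simp

theorem bisect_gt (n : Int) (h : 10000000 < n) :
    bisectLoop [10000, 100000, 1000000, 10000000] n 0 4 = 4 := by
  rw [bisectLoop]
  simp [PySem.List.pyGet?, PySem.List.pyIdx?, show (1000000:Int) < n from by omega]
  rw [bisectLoop]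
  simp [PySem.List.pyGet?, PySem.List.pyIdx?, show (10000000:Int) < n from by omega]
  rw [bisectLoop]
  simp

-- ===== VERDICT (by name: the statement is the Claim_ definition above) =====
theorem auto_iterations_py_spec : Claim_equal_auto_iterations_py := by
  intro n quick _
  unfold Spec_auto_iterations_py auto_iterations_py auto_iterations_py_alt
  cases quick <;>
  · by_cases h1 : n ≤ 10000
    · simp [bisect_le1 n h1, autoIterScan, PySem.Dict.ofList, PySem.Dict.update, PySem.Dict.empty, PySem.Dict.insert, PySem.List.insertBy, PySem.Dict.keys, PySem.Dict.getD, PySem.Dict.get?, PySem.List.sorted, PySem.List.pyGet?, PySem.List.pyIdx?, PySem.List.max?, h1]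
    by_cases h2 : n ≤ 100000
    · simp [bisect_le2 n ⟨by omega, h2⟩, autoIterScan, PySem.Dict.ofList, PySem.Dict.update, PySem.Dict.empty, PySem.Dict.insert, PySem.List.insertBy, PySem.Dict.keys, PySem.Dict.getD, PySem.Dict.get?, PySem.List.sorted, PySem.List.pyGet?, PySem.List.pyIdx?, PySem.List.max?, h1, h2]
    by_cases h3 : n ≤ 1000000
    · simp [bisect_le3 n ⟨by omega, h3⟩, autoIterScan, PySem.Dict.ofList, PySem.Dict.update, PySem.Dict.empty, PySem.Dict.insert, PySem.List.insertBy, PySem.Dict.keys, PySem.Dict.getD, PySem.Dict.get?, PySem.List.sorted, PySem.List.pyGet?, PySem.List.pyIdx?, PySem.List.max?, h1, h2, h3]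
    by_cases h4 : n ≤ 10000000
    · simp [bisect_le4 n ⟨by omega, h4⟩, autoIterScan, PySem.Dict.ofList, PySem.Dict.update, PySem.Dict.empty, PySem.Dict.insert, PySem.List.insertBy, PySem.Dict.keys, PySem.Dict.getD, PySem.Dict.get?, PySem.List.sorted, PySem.List.pyGet?, PySem.List.pyIdx?, PySem.List.max?, h1, h2, h3, h4]
    · simp [bisect_gt n (by omega), autoIterScan, PySem.Dict.ofList, PySem.Dict.update, PySem.Dict.empty, PySem.Dict.insert, PySem.List.insertBy, PySem.Dict.keys, PySem.Dict.getD, PySem.Dict.get?, PySem.List.sorted, PySem.List.pyGet?, PySem.List.pyIdx?, PySem.List.max?, h1, h2, h3, h4]
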